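-- pv_equiv track=rewrite | github.com/yxliao95/arrg_img2text | construct_graph.py | max_coverage_spans
-- ===== SOURCE A (Python) =====
-- import bisect
--
-- def max_coverage_spans(spans):
--     if not spans:
--         return [], 0
--
--     # 按结束时间升序排序
--     sorted_spans = sorted(spans, key=lambda x: x[1])
--     n = len(sorted_spans)
--     starts = [s[0] for s in sorted_spans]
--     ends = [s[1] for s in sorted_spans]
--     lengths = [e - s for s, e in sorted_spans]
--
--     # 预处理j_values数组，记录每个i对应的最大的j，使得 ends[j] <= starts[i]
--     j_values = []
--     for i in range(n):
--         start_i = starts[i]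
--         j = bisect.bisect_right(ends, start_i) - 1  # 二分查找, 找到第一个`大于`start_i的位置
--         j_values.append(j)
--
--     # 构建 dp 数组，其中 dp[i] 表示前 i+1 个 span 的最大总覆盖率。通过比较包含当前 span 和不包含当前 span 的情况，确定最优解。
--     # dp记录了选中下一个span之后的总覆盖率
--     dp = [0] * n
--     dp[0] = lengths[0]
--     for i in range(1, n):
--         j = j_values[i]
--         current = lengths[i] + (dp[j] if j >= 0 else 0)
--         dp[i] = max(dp[i - 1], current)
--
--     # 回溯找出选中的span。从最后一个span开始，如果当前span被选中，则跳到j_values[i]对应的span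
--     # 当dp发生变化时，说明
--     selected_indices = []
--     i = n - 1
--     while i >= 0:
--         if i == 0:
--             if dp[i] == lengths[i]:
--                 selected_indices.append(i)
--             break
--         if dp[i] > dp[i - 1]:
--             selected_indices.append(i)
--             i = j_values[i]
--         else:
--             i -= 1
--
--     selected_indices.reverse()
--     selected_spans = [sorted_spans[i] for i in selected_indices]
--     total_coverage = dp[-1]
--
--     return selected_indices, selected_spans, total_coverage
-- ===== SOURCE B (Python) =====
-- import bisect
--
-- def max_coverage_spans(spans):
--     # Top-down memoized recursion over the weighted-selection recurrence (no dp array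
--     # filled index by index); the reconstruction walk prepends, so no final reverse.
--     if not spans:
--         return [], 0
--     order = sorted(spans, key=lambda x: x[1])
--     n = len(order)
--     ends = [e for _, e in order]
--     pred = [bisect.bisect_right(ends, s) - 1 for s, _ in order]
--     memo = {}
--
--     def best(i):
--         # best coverage achievable among the first i+1 sorted spans (i < 0: nothing)
--         if i < 0:
--             return 0
--         if i in memo:
--             return memo[i]
--         s, e = order[i]
--         # the predecessor contributes only when it really lies before i
--         take = (e - s) + (best(pred[i]) if 0 <= pred[i] < i else 0)
--         v = take if i == 0 else max(best(i - 1), take)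
--         memo[i] = v
--         return v
--
--     total = best(n - 1)
--     chosen = []
--     i = n - 1
--     while i >= 0:
--         if i == 0:
--             chosen = [0] + chosen  # index 0 always improves on the empty prefix
--             break
--         if best(i) > best(i - 1):
--             chosen = [i] + chosen
--             i = pred[i]
--         else:
--             i -= 1
--     return chosen, [order[i] for i in chosen], total
-- ===== Notes on version B (the rewrite author's own statement) =====
-- stated objective: alternative
-- what changed: A fills a preallocated dp array bottom-up with an indexed for-loop and backtracks by appending then reversing; B computes the same recurrence by top-down memoized recursion (best(i) defined recursively, cached in a dict, no dp array or lengths/starts lists) and builds the chosen indices front-to-back by prepending, with no reverse.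
-- outside the precondition, e.g. on max_coverage_spans([]): A returns ([], 0), B returns ([], 0)
import Mathlib
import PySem

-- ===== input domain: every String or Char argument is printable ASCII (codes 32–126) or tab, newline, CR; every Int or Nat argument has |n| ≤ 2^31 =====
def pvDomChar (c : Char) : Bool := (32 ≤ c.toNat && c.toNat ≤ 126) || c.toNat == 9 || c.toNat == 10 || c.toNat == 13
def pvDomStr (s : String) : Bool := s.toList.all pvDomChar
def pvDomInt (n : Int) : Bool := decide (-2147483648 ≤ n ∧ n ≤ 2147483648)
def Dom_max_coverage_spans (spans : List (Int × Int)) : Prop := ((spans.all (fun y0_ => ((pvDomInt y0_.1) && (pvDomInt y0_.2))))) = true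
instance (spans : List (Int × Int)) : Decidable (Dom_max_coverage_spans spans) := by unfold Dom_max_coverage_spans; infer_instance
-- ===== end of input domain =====

-- B replaces A's bottom-up dp array + append-and-reverse backtracking with a top-down
-- memoized recursion for the same recurrence and a prepending reconstruction walk;
-- same cost class (objective: alternative decomposition).


-- ===== PORT A =====

-- A's dp-filling loop body (`for i in range(1, n): ... dp[i] = max(dp[i-1], current)`)
def pvStepA (j_values lengths : List Int) (dp : List Int) (i : Int) : List Int :=
  let j := PySem.List.pyGetD j_values i 0
  let current := PySem.List.pyGetD lengths i 0 + (if 0 ≤ j then PySem.List.pyGetD dp j 0 else 0)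
  dp.set i.toNat (max (PySem.List.pyGetD dp (i - 1) 0) current)

-- A's backtracking `while i >= 0` loop; fuel makes it total (the Python loop can run forever
-- on inputs outside Pre_; a terminating run never revisits an index, so fuel n is exact)
def pvBtA (dp lengths j_values : List Int) : Nat → Int → List Int → List Int
  | 0, _, acc => acc
  | fuel + 1, i, acc =>
    if 0 ≤ i then
      if i = 0 then
        (if PySem.List.pyGetD dp i 0 = PySem.List.pyGetD lengths i 0 then acc ++ [i] else acc)
      else if PySem.List.pyGetD dp (i - 1) 0 < PySem.List.pyGetD dp i 0 then
        pvBtA dp lengths j_values fuel (PySem.List.pyGetD j_values i 0) (acc ++ [i])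
      else
        pvBtA dp lengths j_values fuel (i - 1) acc
    else acc

def max_coverage_spans (spans : List (Int × Int)) : List Int × (List (Int × Int)) × Int :=
  -- Python returns the 2-tuple ([], 0) on empty input, outside the declared triple type;
  -- that input is excluded by Pre_, the port returns a placeholder triple there.
  if spans = [] then ([], [], 0)
  else
    let sorted_spans := PySem.List.sorted spans (fun x => x.2)
    let n := sorted_spans.length
    let starts := sorted_spans.map (fun x => x.1)
    let ends := sorted_spans.map (fun x => x.2)
    let lengths := sorted_spans.map (fun x => x.2 - x.1)
    let j_values := (PySem.List.pyRange 0 (n : Int)).foldl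
      (fun acc i => acc ++ [((PySem.List.bisectRight ends (PySem.List.pyGetD starts i 0) : Int) - 1)]) []
    let dp0 := (List.replicate n (0 : Int)).set 0 (PySem.List.pyGetD lengths 0 0)
    let dp := (PySem.List.pyRange 1 (n : Int)).foldl (pvStepA j_values lengths) dp0
    let selected_indices := (pvBtA dp lengths j_values n ((n : Int) - 1) []).reverse
    let selected_spans := selected_indices.map (fun i => PySem.List.pyGetD sorted_spans i ((0 : Int), (0 : Int)))
    (selected_indices, selected_spans, PySem.List.pyGetD dp (-1) 0)

-- ===== PORT B =====

-- B's recursive best(i) for i ≥ 0 (the memo dict is elided: pure recursion computes the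
-- same values; the `0 <= pred[i] < i` guard is B's own and bounds the recursion)
def pvBestB (order : List (Int × Int)) (pred : List Int) (i : Nat) : Int :=
  let se := PySem.List.pyGetD order (i : Int) ((0 : Int), (0 : Int))
  let p := PySem.List.pyGetD pred (i : Int) 0
  let take := (se.2 - se.1) +
    (if _h : 0 ≤ p ∧ p < (i : Int) then pvBestB order pred p.toNat else 0)
  if hi : i = 0 then take else max (pvBestB order pred (i - 1)) take
termination_by i
decreasing_by
  · omega
  · omega

-- B's best with its `if i < 0: return 0` base case
def pvBestWB (order : List (Int × Int)) (pred : List Int) (i : Int) : Int :=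
  if i < 0 then 0 else pvBestB order pred i.toNat

-- B's `while i >= 0` reconstruction, prepending `[i] + chosen`; fuel as in pvBtA
def pvPickB (order : List (Int × Int)) (pred : List Int) : Nat → Int → List Int → List Int
  | 0, _, acc => acc
  | fuel + 1, i, acc =>
    if 0 ≤ i then
      if i = 0 then [0] ++ acc
      else if pvBestWB order pred (i - 1) < pvBestWB order pred i then
        pvPickB order pred fuel (PySem.List.pyGetD pred i 0) ([i] ++ acc)
      else pvPickB order pred fuel (i - 1) acc
    else acc

def max_coverage_spans_alt (spans : List (Int × Int)) : List Int × (List (Int × Int)) × Int :=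
  if spans = [] then ([], [], 0)
  else
    let order := PySem.List.sorted spans (fun x => x.2)
    let n := order.length
    let ends := order.map (fun x => x.2)
    let pred := order.map (fun x => ((PySem.List.bisectRight ends x.1 : Int) - 1))
    let total := pvBestWB order pred ((n : Int) - 1)
    let chosen := pvPickB order pred n ((n : Int) - 1) []
    (chosen, chosen.map (fun i => PySem.List.pyGetD order i ((0 : Int), (0 : Int))), total)

-- ===== PRECONDITION & SPEC =====

-- Pre_ excludes only the empty list, where A returns a 2-tuple ([], 0) that is not a
-- value of the declared triple type.  (On inputs with degenerate spans the shared
-- reconstruction walk can loop forever; there neither Python returns, and a terminating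
-- walk never revisits an index, so the ports' fuel n is exact wherever Python returns.)
def Pre_max_coverage_spans (spans : List (Int × Int)) : Prop :=
  spans ≠ []
instance (spans : List (Int × Int)) : Decidable (Pre_max_coverage_spans spans) := by
  unfold Pre_max_coverage_spans; infer_instance

def pvWitness_max_coverage_spans : (List (Int × Int)) := [(2, 6), (1, 4), (5, 9)]

def Spec_max_coverage_spans (spans : List (Int × Int)) (out : List Int × (List (Int × Int)) × Int) : Prop := out = max_coverage_spans_alt spans
instance (spans : List (Int × Int)) (out : List Int × (List (Int × Int)) × Int) : Decidable (Spec_max_coverage_spans spans out) := by unfold Spec_max_coverage_spans; infer_instance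

-- ===== CLAIM (what is proved, stated in full; the proofs are below) =====
def Claim_equal_max_coverage_spans : Prop := ∀ (spans : List (Int × Int)), Dom_max_coverage_spans spans → Pre_max_coverage_spans spans → Spec_max_coverage_spans spans (max_coverage_spans spans)

-- ===== LEMMAS AND PROOFS =====

-- canonical dp prefix of length k: the values A's array fold produces
def pvDpSpec (L : List Int) (J : Nat → Int) : Nat → List Int
  | 0 => []
  | k + 1 =>
    let pre := pvDpSpec L J k
    let gain := PySem.List.pyGetD L (k : Int) 0 +
      (if 0 ≤ J k ∧ J k < (k : Int) then PySem.List.pyGetD pre (J k) 0 else 0)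
    pre ++ [if k = 0 then PySem.List.pyGetD L 0 0
            else max (PySem.List.pyGetD pre ((k : Int) - 1) 0) gain]

-- the k-th dp value
def pvDv (L : List Int) (J : Nat → Int) (k : Nat) : Int :=
  PySem.List.pyGetD (pvDpSpec L J (k + 1)) (k : Int) 0

theorem pvDpSpec_length (L : List Int) (J : Nat → Int) (k : Nat) :
    (pvDpSpec L J k).length = k := by
  induction k with
  | zero => rfl
  | succ k ih => simp [pvDpSpec, ih]

theorem pyGetD_append_left {xs ys : List Int} {i : Int} (d : Int)
    (h0 : 0 ≤ i) (h1 : i < (xs.length : Int)) :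
    PySem.List.pyGetD (xs ++ ys) i d = PySem.List.pyGetD xs i d := by
  have hlt : i < ((xs ++ ys).length : Int) := by
    simp only [List.length_append]; push_cast; omega
  rw [PySem.List.pyGetD_eq_getElem _ d h0 hlt, PySem.List.pyGetD_eq_getElem _ d h0 h1,
    List.getElem_append_left]

theorem pyGetD_concat_self (xs : List Int) (v d : Int) :
    PySem.List.pyGetD (xs ++ [v]) (xs.length : Int) d = v := by
  have h1 : (xs.length : Int) < ((xs ++ [v]).length : Int) := by
    simp only [List.length_append, List.length_cons, List.length_nil]; push_cast; omega
  rw [PySem.List.pyGetD_eq_getElem _ d (by positivity) h1]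
  simp

theorem pyGetD_concat (xs : List Int) (v d : Int) {i : Int} (h : i = (xs.length : Int)) :
    PySem.List.pyGetD (xs ++ [v]) i d = v := by
  subst h; exact pyGetD_concat_self xs v d

theorem pvDpSpec_getD (L : List Int) (J : Nat → Int) :
    ∀ {k i : Nat}, i < k →
      PySem.List.pyGetD (pvDpSpec L J k) (i : Int) 0 = pvDv L J i := by
  intro k
  induction k with
  | zero => intro i h; omega
  | succ k ih =>
    intro i h
    rcases Nat.lt_or_ge i k with hik | hik
    · show PySem.List.pyGetD (pvDpSpec L J (k + 1)) (i : Int) 0 = _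
      rw [show pvDpSpec L J (k + 1) = pvDpSpec L J k ++ _ from rfl]
      rw [pyGetD_append_left 0 (by positivity) (by rw [pvDpSpec_length]; exact_mod_cast hik)]
      exact ih hik
    · have : i = k := by omega
      subst this
      rfl

theorem pvDv_zero (L : List Int) (J : Nat → Int) :
    pvDv L J 0 = PySem.List.pyGetD L 0 0 := by
  show PySem.List.pyGetD ([] ++ [if 0 = 0 then _ else _]) ((0:Nat) : Int) 0 = _
  simp

-- the recurrence satisfied by the dp values, in the form B's recursion computes
theorem pvDv_succ (L : List Int) (J : Nat → Int) (k : Nat) (hk : k ≠ 0) :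
    pvDv L J k = max (pvDv L J (k - 1))
      (PySem.List.pyGetD L (k : Int) 0 +
        (if 0 ≤ J k ∧ J k < (k : Int) then pvDv L J (J k).toNat else 0)) := by
  rw [pvDv, show pvDpSpec L J (k + 1) = pvDpSpec L J k ++
      [if k = 0 then PySem.List.pyGetD L 0 0
       else max (PySem.List.pyGetD (pvDpSpec L J k) ((k : Int) - 1) 0)
         (PySem.List.pyGetD L (k : Int) 0 +
           (if 0 ≤ J k ∧ J k < (k : Int) then
             PySem.List.pyGetD (pvDpSpec L J k) (J k) 0 else 0))] from rfl,
    pyGetD_concat _ _ _ (by rw [pvDpSpec_length]), if_neg hk,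
    show ((k : Int) - 1) = ((k - 1 : Nat) : Int) from by omega,
    pvDpSpec_getD L J (by omega : k - 1 < k)]
  by_cases h : 0 ≤ J k ∧ J k < (k : Int)
  · rw [if_pos h, if_pos h, show J k = (((J k).toNat : Nat) : Int) from by omega,
      pvDpSpec_getD L J (by omega : (J k).toNat < k), Int.toNat_natCast]
  · rw [if_neg h, if_neg h]

theorem pyGetD_ge {xs : List Int} {i : Int} (d : Int) (h : (xs.length : Int) ≤ i) :
    PySem.List.pyGetD xs i d = d := by
  rw [PySem.List.pyGetD, PySem.List.pyGet?, PySem.List.pyIdx?,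
    if_pos (by omega : (0 : Int) ≤ i), if_neg (by omega : ¬ i < (xs.length : Int))]
  rfl

theorem pyGetD_pad_zero (xs : List Int) (m : Nat) {i : Int} (h : (xs.length : Int) ≤ i) :
    PySem.List.pyGetD (xs ++ List.replicate m (0 : Int)) i 0 = 0 := by
  rcases lt_or_ge i ((xs.length + m : Nat) : Int) with hlt | hge
  · rw [PySem.List.pyGetD_eq_getElem _ 0 (by omega)
      (by rw [List.length_append, List.length_replicate]; exact_mod_cast hlt)]
    rw [List.getElem_append_right (by omega)]
    exact List.getElem_replicate _
  · exact pyGetD_ge 0 (by rw [List.length_append, List.length_replicate]; push_cast; omega)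

-- A's fold fills the preallocated array exactly with the canonical dp prefix
theorem pvFoldA (lens jvl : List Int) (n : Nat) :
    ∀ k : Nat, 1 ≤ k → k ≤ n →
      (PySem.List.pyRange 1 (k : Int)).foldl (pvStepA jvl lens)
          ((List.replicate n (0 : Int)).set 0 (PySem.List.pyGetD lens 0 0))
        = pvDpSpec lens (fun i => PySem.List.pyGetD jvl (i : Int) 0) k
            ++ List.replicate (n - k) 0 := by
  intro k
  induction k with
  | zero => omega
  | succ k ih =>
    intro _ hkn
    rcases Nat.eq_zero_or_pos k with hk0 | hk1
    · subst hk0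
      rw [show PySem.List.pyRange 1 ((1 : Nat) : Int) = [] from rfl]
      obtain ⟨m, rfl⟩ : ∃ m, n = m + 1 := ⟨n - 1, by omega⟩
      show (List.replicate (m + 1) (0 : Int)).set 0 _ = _
      simp [pvDpSpec, List.replicate_succ]
    · have hkn' : k ≤ n := by omega
      have hcast : ((k + 1 : Nat) : Int) = (k : Int) + 1 := by push_cast; ring
      rw [hcast, PySem.List.pyRange_one_succ_right (by exact_mod_cast hk1), List.foldl_append,
        ih hk1 hkn']
      set J : Nat → Int := fun i => PySem.List.pyGetD jvl (i : Int) 0 with hJ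
      set pre := pvDpSpec lens J k with hpre
      have hlen : pre.length = k := pvDpSpec_length lens J k
      show pvStepA jvl lens (pre ++ List.replicate (n - k) 0) (k : Int) = _
      have hread1 : PySem.List.pyGetD (pre ++ List.replicate (n - k) 0) ((k : Int) - 1) 0
          = PySem.List.pyGetD pre ((k : Int) - 1) 0 := by
        apply pyGetD_append_left 0 (by omega)
        rw [hlen]; omega
      have hgain : (if 0 ≤ J k then
            PySem.List.pyGetD (pre ++ List.replicate (n - k) 0) (J k) 0 else 0)
          = (if 0 ≤ J k ∧ J k < (k : Int) then PySem.List.pyGetD pre (J k) 0 else 0) := by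
        by_cases h0 : 0 ≤ J k
        · by_cases h1 : J k < (k : Int)
          · rw [if_pos h0, if_pos ⟨h0, h1⟩,
              pyGetD_append_left 0 h0 (by rw [hlen]; exact h1)]
          · rw [if_pos h0, if_neg (by tauto),
              pyGetD_pad_zero pre (n - k) (by rw [hlen]; omega)]
        · rw [if_neg h0, if_neg (by tauto)]
      show (pre ++ List.replicate (n - k) 0).set (k : Int).toNat
          (max (PySem.List.pyGetD (pre ++ List.replicate (n - k) 0) ((k : Int) - 1) 0)
            (PySem.List.pyGetD lens (k : Int) 0 +
              (if 0 ≤ PySem.List.pyGetD jvl (k : Int) 0 then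
                PySem.List.pyGetD (pre ++ List.replicate (n - k) 0)
                  (PySem.List.pyGetD jvl (k : Int) 0) 0 else 0))) = _
      rw [show (PySem.List.pyGetD jvl (k : Int) 0) = J k from rfl, hread1, hgain]
      rw [show ((k : Int)).toNat = k from by omega]
      rw [List.set_append, if_neg (by rw [hlen]; omega), hlen, Nat.sub_self]
      obtain ⟨m, hm⟩ : ∃ m, n - k = m + 1 := ⟨n - k - 1, by omega⟩
      rw [hm, List.replicate_succ, List.set_cons_zero]
      rw [show pvDpSpec lens J (k + 1) = pre ++
          [if k = 0 then PySem.List.pyGetD lens 0 0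
           else max (PySem.List.pyGetD pre ((k : Int) - 1) 0)
             (PySem.List.pyGetD lens (k : Int) 0 +
               (if 0 ≤ J k ∧ J k < (k : Int) then PySem.List.pyGetD pre (J k) 0 else 0))]
        from rfl]
      rw [if_neg (by omega : ¬ k = 0)]
      rw [show n - (k + 1) = m from by omega]
      simp

-- B's recursion computes exactly the canonical dp values
theorem pvBest_eq (order : List (Int × Int)) (pred : List Int) (L : List Int) (n : Nat)
    (hL : L = order.map (fun x => x.2 - x.1)) (hn : n = order.length) (J : Nat → Int)
    (hpr : ∀ i : Nat, i < n → PySem.List.pyGetD pred (i : Int) 0 = J i) :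
    ∀ i : Nat, i < n → pvBestB order pred i = pvDv L J i := by
  intro i
  induction i using Nat.strong_induction_on with
  | _ i ih =>
    intro hi
    have hio : i < order.length := by omega
    have him : i < (order.map (fun x => x.2 - x.1)).length := by
      rw [List.length_map]; omega
    have hse : (PySem.List.pyGetD order (i : Int) ((0 : Int), (0 : Int))).2 -
        (PySem.List.pyGetD order (i : Int) ((0 : Int), (0 : Int))).1
        = PySem.List.pyGetD L (i : Int) 0 := by
      rw [hL, PySem.List.pyGetD_natCast, PySem.List.pyGetD_natCast,
        List.getD_eq_getElem (order.map (fun x => x.2 - x.1)) _ him,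
        List.getElem_map, List.getD_eq_getElem order _ hio]
    rw [pvBestB]
    rw [hpr i hi]
    rcases Nat.eq_zero_or_pos i with hi0 | hipos
    · subst hi0
      rw [dif_pos rfl, dif_neg (by omega : ¬ (0 ≤ J 0 ∧ J 0 < ((0 : Nat) : Int))),
        pvDv_zero, add_zero]
      simpa using hse
    · rw [dif_neg (by omega : ¬ i = 0), pvDv_succ L J i (by omega),
        ih (i - 1) (by omega) (by omega), hse]
      by_cases h : 0 ≤ J i ∧ J i < (i : Int)
      · rw [dif_pos h, if_pos h, ih (J i).toNat (by omega) (by omega)]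
      · rw [dif_neg h, if_neg h]

-- the two reconstruction loops produce the same list (A's reversed at the end)
theorem pvBt_pick (dp lens jvl : List Int) (order : List (Int × Int)) (pred : List Int)
    (n : Nat)
    (hdp0 : PySem.List.pyGetD dp 0 0 = PySem.List.pyGetD lens 0 0)
    (hb : ∀ k : Nat, k < n →
      pvBestWB order pred (k : Int) = PySem.List.pyGetD dp (k : Int) 0)
    (hje : ∀ i : Nat, 1 ≤ i → i < n →
      PySem.List.pyGetD pred (i : Int) 0 = PySem.List.pyGetD jvl (i : Int) 0)
    (hjn : ∀ i : Nat, 1 ≤ i → i < n → PySem.List.pyGetD jvl (i : Int) 0 < (n : Int)) :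
    ∀ (F : Nat) (i : Int) (acc : List Int), i < (n : Int) →
      (pvBtA dp lens jvl F i acc).reverse = pvPickB order pred F i acc.reverse := by
  intro F
  induction F with
  | zero => intro i acc _; rfl
  | succ F ih =>
    intro i acc hin
    rcases lt_trichotomy i 0 with hneg | hzero | hpos
    · rw [pvBtA, if_neg (by omega), pvPickB, if_neg (by omega)]
    · subst hzero
      rw [pvBtA, if_pos le_rfl, if_pos rfl, if_pos hdp0, pvPickB, if_pos le_rfl,
        if_pos rfl]
      simp
    · have hk1 : 1 ≤ i.toNat := by omega
      have hkn : i.toNat < n := by omega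
      have hcast : ((i.toNat : Nat) : Int) = i := by omega
      have e1 : pvBestWB order pred i = PySem.List.pyGetD dp i 0 := by
        have := hb i.toNat hkn; rwa [hcast] at this
      have e2 : pvBestWB order pred (i - 1) = PySem.List.pyGetD dp (i - 1) 0 := by
        have := hb (i.toNat - 1) (by omega)
        rwa [show (((i.toNat - 1 : Nat)) : Int) = i - 1 from by omega] at this
      have hjei := hje i.toNat hk1 hkn
      have hjni := hjn i.toNat hk1 hkn
      rw [hcast] at hjei hjni
      have h0i : (0 : Int) ≤ i := by omega
      have hne : ¬ i = 0 := by omega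
      by_cases hlt : PySem.List.pyGetD dp (i - 1) 0 < PySem.List.pyGetD dp i 0
      · rw [pvBtA, pvPickB]
        simp only [if_pos h0i, if_neg hne, e1, e2, if_pos hlt, hjei]
        have := ih (PySem.List.pyGetD jvl i 0) (acc ++ [i]) hjni
        simpa using this
      · rw [pvBtA, pvPickB]
        simp only [if_pos h0i, if_neg hne, e1, e2, if_neg hlt]
        exact ih (i - 1) acc (by omega)

theorem pyGetD_neg_one (xs : List Int) (d : Int) (h : xs ≠ []) :
    PySem.List.pyGetD xs (-1) d = PySem.List.pyGetD xs ((xs.length - 1 : Nat) : Int) d := by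
  have hn : 1 ≤ xs.length := List.length_pos_iff.mpr h
  have h1 : PySem.List.pyIdx? xs.length (-1) = some (xs.length - 1) := by
    rw [PySem.List.pyIdx?, if_neg (by omega), if_pos (by omega)]
    norm_num
  have h2 : PySem.List.pyIdx? xs.length ((xs.length - 1 : Nat) : Int) = some (xs.length - 1) := by
    rw [PySem.List.pyIdx?, if_pos (by positivity), if_pos (by omega)]
    norm_num
  simp [PySem.List.pyGetD, PySem.List.pyGet?, h1, h2]

-- ===== VERDICT (by name: the statement is the Claim_ definition above) =====
theorem max_coverage_spans_spec : Claim_equal_max_coverage_spans := by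
  intro spans _ hne
  show max_coverage_spans spans = max_coverage_spans_alt spans
  rw [max_coverage_spans, max_coverage_spans_alt, if_neg hne, if_neg hne]
  dsimp only
  set order := PySem.List.sorted spans (fun x => x.2) with horder
  set n := order.length with hn
  have hn1 : 1 ≤ n := by
    rw [hn, horder, PySem.List.length_sorted]
    exact List.length_pos_iff.mpr hne
  set ends := order.map (fun x => x.2) with hends
  set starts := order.map (fun x => x.1) with hstarts
  set lens := order.map (fun x => x.2 - x.1) with hlens
  set pred := order.map (fun x => ((PySem.List.bisectRight ends x.1 : Int) - 1)) with hpred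
  have hpair : List.Pairwise (· ≤ ·) ends := by
    rw [hends, horder]
    exact PySem.List.sorted_map_key_pairwise spans (fun x => x.2)
  set J : Nat → Int :=
    fun i => (PySem.List.bisectRight ends (PySem.List.pyGetD starts (i : Int) 0) : Int) - 1
    with hJdef
  have hjv : (PySem.List.pyRange 0 (n : Int)).foldl
      (fun acc i => acc ++ [((PySem.List.bisectRight ends (PySem.List.pyGetD starts i 0) : Int) - 1)]) []
      = (List.range n).map J := by
    rw [PySem.List.foldl_append_singleton_eq_map
        (fun i => ((PySem.List.bisectRight ends (PySem.List.pyGetD starts i 0) : Int) - 1)),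
      List.nil_append, PySem.List.pyRange_zero_natCast, List.map_map]
    rfl
  set jvl := (List.range n).map J with hjvl
  have hstartsread : ∀ i : Nat, i < n →
      PySem.List.pyGetD starts (i : Int) 0 = (order.getD i ((0 : Int), (0 : Int))).1 := by
    intro i hi
    rw [hstarts, PySem.List.pyGetD_natCast,
      List.getD_eq_getElem _ _ (by rw [List.length_map]; exact hi),
      List.getElem_map, List.getD_eq_getElem _ _ hi]
  have hjvlread : ∀ i : Nat, i < n → PySem.List.pyGetD jvl (i : Int) 0 = J i := by
    intro i hi
    rw [hjvl, PySem.List.pyGetD_natCast, PySem.List.getD_map_range J n i 0 hi]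
  set J' : Nat → Int := fun i => PySem.List.pyGetD jvl (i : Int) 0 with hJ'def
  have hJ'eq : ∀ i : Nat, i < n → J' i = J i := by
    intro i hi
    rw [hJ'def]
    simp only []
    exact hjvlread i hi
  have hpredread : ∀ i : Nat, i < n → PySem.List.pyGetD pred (i : Int) 0 = J' i := by
    intro i hi
    rw [hpred, PySem.List.pyGetD_natCast,
      List.getD_eq_getElem _ _ (by rw [List.length_map]; exact hi),
      List.getElem_map, hJ'eq i hi, hJdef]
    simp only []
    rw [hstartsread i hi, List.getD_eq_getElem _ _ hi]
  have hdpA := pvFoldA lens jvl n n hn1 le_rfl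
  rw [← hJ'def, Nat.sub_self, List.replicate_zero, List.append_nil] at hdpA
  set dpS := pvDpSpec lens J' n with hdpS
  have hdpread : ∀ i : Nat, i < n → PySem.List.pyGetD dpS (i : Int) 0 = pvDv lens J' i := by
    intro i hi
    rw [hdpS]
    exact pvDpSpec_getD lens J' hi
  have hbest : ∀ i : Nat, i < n → pvBestB order pred i = pvDv lens J' i :=
    pvBest_eq order pred lens n hlens hn J' hpredread
  have hb : ∀ k : Nat, k < n →
      pvBestWB order pred (k : Int) = PySem.List.pyGetD dpS (k : Int) 0 := by
    intro k hk
    rw [pvBestWB, if_neg (by omega : ¬ ((k : Nat) : Int) < 0),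
      show ((k : Nat) : Int).toNat = k from by omega, hbest k hk, hdpread k hk]
  have hjn : ∀ i : Nat, 1 ≤ i → i < n → PySem.List.pyGetD jvl (i : Int) 0 < (n : Int) := by
    intro i h1 hin
    rw [hjvlread i hin]
    show (PySem.List.bisectRight ends (PySem.List.pyGetD starts (i : Int) 0) : Int) - 1
      < (n : Int)
    have hble := (PySem.List.bisectRight_spec ends
      (PySem.List.pyGetD starts (i : Int) 0) hpair).1
    rw [show ends.length = n from by rw [hends, List.length_map, hn]] at hble
    omega
  have hsel : (pvBtA dpS lens jvl n ((n : Int) - 1) []).reverse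
      = pvPickB order pred n ((n : Int) - 1) [] := by
    have := pvBt_pick dpS lens jvl order pred n
      (by simpa [pvDv_zero] using hdpread 0 hn1)
      hb (fun i h1 hin => hpredread i hin) hjn
      n ((n : Int) - 1) [] (by omega)
    simpa using this
  have htot : PySem.List.pyGetD dpS (-1) 0 = pvBestWB order pred ((n : Int) - 1) := by
    have hlen : dpS.length = n := by rw [hdpS]; exact pvDpSpec_length lens J' n
    rw [pyGetD_neg_one dpS 0 (by rw [← List.length_pos_iff, hlen]; omega), hlen,
      hdpread (n - 1) (by omega), pvBestWB, if_neg (by omega : ¬ (n : Int) - 1 < 0),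
      show ((n : Int) - 1).toNat = n - 1 from by omega, hbest (n - 1) (by omega)]
  rw [hjv, hdpA, hsel, htot]
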